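-- pv_equiv track=rewrite | github.com/chrisli1995/learnPython | paper_reforatt/preprocessing.py | count_re
-- ===== SOURCE A (Python) =====
-- def count_re(output_re):
--     output=[]
--     num=[1]
--     entity_1=output_re[0][0]
--     entity_2 = output_re[0][1]
--     for data in output_re:
--         if data[0]==entity_1 and data[1]==entity_2:
--             output.append(num+data)
--         else:
--             entity_1=data[0]
--             entity_2=data[1]
--             num[0]=num[0]+1
--             output.append(num+data)
--     return output
-- ===== SOURCE B (Python) =====
-- def count_re(output_re):
--     result = []
--     num = 0
--     i = 0
--     n = len(output_re)
--     while i < n: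
--         key = (output_re[i][0], output_re[i][1])
--         num += 1
--         j = i
--         while j < n and (output_re[j][0], output_re[j][1]) == key:
--             result.append([num] + output_re[j])
--             j += 1
--         i = j
--     return result
-- ===== Notes on version B (the rewrite author's own statement) =====
-- stated objective: alternative
-- what changed: Replaces A's previous-pair/counter state machine (one pass mutating entity_1/entity_2 and a shared num list) with run-based grouping: an outer loop finds each maximal run of equal (row[0],row[1]) keys and an inner loop emits that whole run with its 1-based run number. (Pre_ excludes the empty list and rows shorter than 2, where Python A raises IndexError.)
import Mathlib
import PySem

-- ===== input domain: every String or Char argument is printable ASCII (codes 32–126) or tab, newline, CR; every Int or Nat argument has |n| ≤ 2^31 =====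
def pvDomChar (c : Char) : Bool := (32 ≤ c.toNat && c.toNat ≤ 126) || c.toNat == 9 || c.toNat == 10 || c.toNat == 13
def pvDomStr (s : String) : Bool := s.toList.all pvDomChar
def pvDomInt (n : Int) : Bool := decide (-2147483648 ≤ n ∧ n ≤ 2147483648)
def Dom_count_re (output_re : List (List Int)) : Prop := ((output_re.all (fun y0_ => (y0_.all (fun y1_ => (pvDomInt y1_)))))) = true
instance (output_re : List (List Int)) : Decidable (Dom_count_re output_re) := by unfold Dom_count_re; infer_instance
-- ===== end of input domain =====

-- B replaces A's previous-pair state machine with run-based grouping (outer loop per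
-- maximal run of equal (row[0],row[1]) keys, inner loop emitting the run); same cost.

-- row[0] and row[1]; exact for rows of length ≥ 2 (Pre_), which is all Pre_ admits
def pvG0 (r : List Int) : Int := r.headD 0
def pvG1 (r : List Int) : Int := (r.drop 1).headD 0

-- ===== PORT A =====
-- A's for loop as structural recursion over the same state (output, num, entity_1, entity_2)
def pvAGo (l : List (List Int)) (out : List (List Int)) (num e1 e2 : Int) : List (List Int) :=
  match l with
  | [] => out
  | data :: rest =>
    if (pvG0 data == e1) && (pvG1 data == e2) then
      pvAGo rest (out ++ [num :: data]) num e1 e2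
    else
      pvAGo rest (out ++ [(num + 1) :: data]) (num + 1) (pvG0 data) (pvG1 data)

def count_re (output_re : List (List Int)) : List (List Int) :=
  match output_re with
  | [] => []   -- Python raises IndexError here; outside Pre_
  | r0 :: _ => pvAGo output_re [] 1 (pvG0 r0) (pvG1 r0)

-- ===== PORT B =====
def pvKeyEq (k : Int × Int) (d : List Int) : Bool := (pvG0 d == k.1) && (pvG1 d == k.2)

-- B's outer while loop: each step consumes one maximal run
def pvBGo : List (List Int) → Int → List (List Int)
  | [], _ => []
  | r :: rest, num =>
    ((r :: rest).takeWhile (pvKeyEq (pvG0 r, pvG1 r))).map (fun d => (num + 1) :: d)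
      ++ pvBGo ((r :: rest).dropWhile (pvKeyEq (pvG0 r, pvG1 r))) (num + 1)
termination_by l _ => l.length
decreasing_by
  have h : pvKeyEq (pvG0 r, pvG1 r) r = true := by simp [pvKeyEq]
  simp [List.dropWhile, h]
  exact List.length_dropWhile_le _ _

def count_re_alt (output_re : List (List Int)) : List (List Int) :=
  pvBGo output_re 0

-- ===== PRECONDITION & SPEC =====
-- exactly where Python A returns: nonempty input, every row of length ≥ 2 (else IndexError)
def Pre_count_re (output_re : List (List Int)) : Prop :=
  output_re ≠ [] ∧ ∀ r ∈ output_re, 2 ≤ r.length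
instance (output_re : List (List Int)) : Decidable (Pre_count_re output_re) := by
  unfold Pre_count_re; infer_instance
def pvWitness_count_re : List (List Int) := [[1, 2, 3], [1, 2, 4], [5, 2, 0]]

def Spec_count_re (output_re : List (List Int)) (out : List (List Int)) : Prop :=
  out = count_re_alt output_re
instance (output_re : List (List Int)) (out : List (List Int)) : Decidable (Spec_count_re output_re out) := by
  unfold Spec_count_re; infer_instance

-- ===== CLAIM (what is proved, stated in full; the proofs are below) =====
def Claim_equal_count_re : Prop := ∀ (output_re : List (List Int)), Dom_count_re output_re → Pre_count_re output_re → Spec_count_re output_re (count_re output_re)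
-- ===== LEMMAS AND PROOFS =====

theorem pvBGo_nil (num : Int) : pvBGo [] num = [] := by rw [pvBGo]

theorem pvBGo_cons (r : List Int) (rest : List (List Int)) (num : Int) :
    pvBGo (r :: rest) num =
      ((r :: rest).takeWhile (pvKeyEq (pvG0 r, pvG1 r))).map (fun d => (num + 1) :: d)
      ++ pvBGo ((r :: rest).dropWhile (pvKeyEq (pvG0 r, pvG1 r))) (num + 1) := by rw [pvBGo]

-- A's state machine, run from the key (e1,e2) of the current run, equals: emit the
-- rest of that run with number num, then B's grouping (counter num) on what remains.
theorem pvAGo_eq (l : List (List Int)) :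
    ∀ (out : List (List Int)) (num e1 e2 : Int),
      pvAGo l out num e1 e2 =
        out ++ (l.takeWhile (pvKeyEq (e1, e2))).map (fun d => num :: d)
            ++ pvBGo (l.dropWhile (pvKeyEq (e1, e2))) num := by
  induction l with
  | nil => intro out num e1 e2; simp [pvAGo, pvBGo_nil]
  | cons d rest ih =>
    intro out num e1 e2
    simp only [pvAGo, List.takeWhile, List.dropWhile, pvKeyEq]
    by_cases h : ((pvG0 d == e1) && (pvG1 d == e2)) = true
    · rw [if_pos h, h, ih]
      simp
    · rw [if_neg h, eq_false_of_ne_true h, ih]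
      rw [pvBGo_cons]
      have hd : pvKeyEq (pvG0 d, pvG1 d) d = true := by simp [pvKeyEq]
      simp only [List.takeWhile, List.dropWhile, hd]
      simp

-- ===== VERDICT (by name: the statement is the Claim_ definition above) =====
theorem count_re_spec : Claim_equal_count_re := by
  intro output_re _ hpre
  unfold Spec_count_re count_re count_re_alt
  match output_re, hpre with
  | r :: rest, _ =>
    show pvAGo (r :: rest) [] 1 (pvG0 r) (pvG1 r) = pvBGo (r :: rest) 0
    rw [pvAGo_eq, pvBGo_cons]
    have hd : pvKeyEq (pvG0 r, pvG1 r) r = true := by simp [pvKeyEq]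
    simp only [List.takeWhile, List.dropWhile, hd]
    norm_num
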